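-- pv_equiv track=rewrite | github.com/Chalermwat/Privacy-Preserving-Source-Code-Similarity-Detection | Client/tlsh/Timing/Sample_Entire/s521442030.py | find_lakes
-- ===== SOURCE A (Python) =====
-- def find_lakes(diagram):
--     """Find lakes in diagram.
--
--     >>> pat = str.maketrans('ufd', '/_\\\\')
--     >>> find_lakes('ddfuu'.translate(pat))
--     [6]
--     >>> find_lakes('dduuudfududdddufudduuuffdddfddufdufud'.translate(pat))
--     [4, 2, 1, 19, 9]
--     >>> find_lakes('ff'.translate(pat))
--     []
--     """
--     def calc_areas(ls):
--         areas = []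
--         e1, e2 = 0, 0
--         for n, m in reversed(ls):
--             if e1 < n and e2 > m:
--                 area = areas.pop()
--                 areas.append(area + (m - n))
--             else:
--                 areas.append(m - n)
--                 e1, e2 = n, m
--         return areas[::-1]
--
--     lakes = []
--     slopes = []
--
--     for i, c in enumerate(diagram):
--         if c == '\\':
--             slopes.append(i)
--         elif c == '/':
--             if len(slopes) > 0:
--                 lakes.append((slopes.pop(), i))
--
--     return calc_areas(lakes)
-- ===== SOURCE B (Python) =====
-- def find_lakes(diagram):
--     slopes = []
--     ponds = []  # stack of (left_index, area) with lefts strictly increasing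
--     for i, c in enumerate(diagram):
--         if c == '\\':
--             slopes.append(i)
--         elif c == '/' and slopes:
--             j = slopes.pop()
--             area = i - j
--             while ponds and ponds[-1][0] > j:
--                 area += ponds.pop()[1]
--             ponds.append((j, area))
--     return [area for _, area in ponds]
-- ===== Notes on version B (the rewrite author's own statement) =====
-- stated objective: simpler
-- what changed: B replaces A's two-phase build-all-(left,right)-pairs-then-reversed-merge pass with a single left-to-right scan keeping a stack of (left_index, area) ponds that absorbs nested ponds inline.
import Mathlib
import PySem

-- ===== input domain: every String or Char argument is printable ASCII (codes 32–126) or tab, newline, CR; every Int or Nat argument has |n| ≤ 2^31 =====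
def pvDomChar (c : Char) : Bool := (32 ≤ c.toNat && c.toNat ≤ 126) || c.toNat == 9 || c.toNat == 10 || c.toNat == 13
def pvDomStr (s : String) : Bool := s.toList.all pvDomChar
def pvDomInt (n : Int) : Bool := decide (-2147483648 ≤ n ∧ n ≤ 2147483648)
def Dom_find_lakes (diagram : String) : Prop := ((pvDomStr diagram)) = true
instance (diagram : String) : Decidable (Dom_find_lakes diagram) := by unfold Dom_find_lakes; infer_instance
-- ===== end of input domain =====

-- B is a single-pass pond-stack scan instead of A's build-pairs-then-reversed-merge; equal return value proved below.

-- ===== PORT A =====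
-- areas is kept head-first (Python appends/pops at the list END); the head-first list
-- equals Python's areas[::-1], so calcAreas returns the fold's list directly.
def calcStep (st : List Int × Int × Int) (p : Int × Int) : List Int × Int × Int :=
  if st.2.1 < p.1 ∧ st.2.2 > p.2 then
    match st.1 with
    | a :: rest => ((a + (p.2 - p.1)) :: rest, st.2.1, st.2.2)
    | [] => ([], st.2.1, st.2.2)  -- unreachable on lists find_lakes builds (first iteration never merges since e2 = 0 ≤ m)
  else ((p.2 - p.1) :: st.1, p.1, p.2)

def calcAreas (ls : List (Int × Int)) : List Int :=
  (ls.reverse.foldl calcStep ([], 0, 0)).1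

-- slopes head = Python list end (top of stack); lakes keeps Python's append order
def scanStepA (st : List (Int × Int) × List Int) (p : Int × Char) : List (Int × Int) × List Int :=
  if p.2 = '\\' then (st.1, p.1 :: st.2)
  else if p.2 = '/' then
    match st.2 with
    | j :: rest => (st.1 ++ [(j, p.1)], rest)
    | [] => st
  else st

def find_lakes (diagram : String) : List Int :=
  calcAreas ((PySem.List.enumerate diagram.toList).foldl scanStepA ([], [])).1

-- ===== PORT B =====
-- ponds head = Python list end (top of stack)
def pondPush (ponds : List (Int × Int)) (j : Int) (area : Int) : List (Int × Int) :=
  match ponds with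
  | (l, a) :: rest => if l > j then pondPush rest j (area + a) else (j, area) :: (l, a) :: rest
  | [] => [(j, area)]

def scanStepB (st : List Int × List (Int × Int)) (p : Int × Char) : List Int × List (Int × Int) :=
  if p.2 = '\\' then (p.1 :: st.1, st.2)
  else if p.2 = '/' then
    match st.1 with
    | j :: rest => (rest, pondPush st.2 j (p.1 - j))
    | [] => st
  else st

def find_lakes_alt (diagram : String) : List Int :=
  (((PySem.List.enumerate diagram.toList).foldl scanStepB ([], [])).2.map Prod.snd).reverse

-- ===== PRECONDITION & SPEC =====
def Spec_find_lakes (diagram : String) (out : List Int) : Prop := out = find_lakes_alt diagram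
instance (diagram : String) (out : List Int) : Decidable (Spec_find_lakes diagram out) := by unfold Spec_find_lakes; infer_instance

-- ===== CLAIM (what is proved, stated in full; the proofs are below) =====
def Claim_equal_find_lakes : Prop := ∀ (diagram : String), Dom_find_lakes diagram → Spec_find_lakes diagram (find_lakes diagram)

-- ===== LEMMAS AND PROOFS =====

-- B's pond-building as a function of A's pair list
def gstep (P : List (Int × Int)) (p : Int × Int) : List (Int × Int) := pondPush P p.1 (p.2 - p.1)
def G (ls : List (Int × Int)) : List (Int × Int) := ls.foldl gstep []

-- p closed before q: q strictly contains p, or q lies strictly to the right of p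
def Nested (p q : Int × Int) : Prop := p.2 < q.2 ∧ (q.1 < p.1 ∨ p.2 < q.1)
def WF (ls : List (Int × Int)) : Prop := (∀ p ∈ ls, 0 ≤ p.1 ∧ p.1 < p.2) ∧ ls.Pairwise Nested

def ScanInv (lakes : List (Int × Int)) (slopes : List Int) (pos : Int) : Prop :=
  WF lakes ∧ slopes.Pairwise (· > ·) ∧
  (∀ j ∈ slopes, 0 ≤ j ∧ j < pos) ∧
  (∀ j ∈ slopes, ∀ p ∈ lakes, j < p.1 ∨ p.2 < j) ∧
  (∀ p ∈ lakes, p.2 < pos)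

theorem scan_rel (cs : List Char) : ∀ (k : Int) (lakes : List (Int × Int)) (slopes : List Int),
    (PySem.List.enumerate cs k).foldl scanStepB (slopes, G lakes)
      = ((((PySem.List.enumerate cs k).foldl scanStepA (lakes, slopes)).2),
         G (((PySem.List.enumerate cs k).foldl scanStepA (lakes, slopes)).1)) := by
  induction cs with
  | nil => intro k lakes slopes; simp [PySem.List.enumerate]
  | cons c cs' ih =>
    intro k lakes slopes
    rw [PySem.List.enumerate_cons]
    simp only [List.foldl_cons]
    by_cases hb : c = '\\'
    · have hA : scanStepA (lakes, slopes) (k, c) = (lakes, k :: slopes) := by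
        simp [scanStepA, hb]
      have hB : scanStepB (slopes, G lakes) (k, c) = (k :: slopes, G lakes) := by
        simp [scanStepB, hb]
      rw [hA, hB]; exact ih (k + 1) lakes (k :: slopes)
    · by_cases hf : c = '/'
      · cases slopes with
        | nil =>
          have hA : scanStepA (lakes, []) (k, c) = (lakes, []) := by
            simp [scanStepA, hf]
          have hB : scanStepB ([], G lakes) (k, c) = ([], G lakes) := by
            simp [scanStepB, hf]
          rw [hA, hB]; exact ih (k + 1) lakes []
        | cons j rest =>
          have hA : scanStepA (lakes, j :: rest) (k, c) = (lakes ++ [(j, k)], rest) := by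
            simp [scanStepA, hf]
          have hG : G (lakes ++ [(j, k)]) = pondPush (G lakes) j (k - j) := by
            simp [G, List.foldl_append, gstep]
          have hB : scanStepB (j :: rest, G lakes) (k, c)
              = (rest, G (lakes ++ [(j, k)])) := by
            simp [scanStepB, hf, hG]
          rw [hA, hB]; exact ih (k + 1) (lakes ++ [(j, k)]) rest
      · have hA : scanStepA (lakes, slopes) (k, c) = (lakes, slopes) := by
          simp [scanStepA, hb, hf]
        have hB : scanStepB (slopes, G lakes) (k, c) = (slopes, G lakes) := by
          simp [scanStepB, hb, hf]
        rw [hA, hB]; exact ih (k + 1) lakes slopes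

theorem scan_inv (cs : List Char) : ∀ (k : Int) (lakes : List (Int × Int)) (slopes : List Int),
    0 ≤ k → ScanInv lakes slopes k →
    ScanInv (((PySem.List.enumerate cs k).foldl scanStepA (lakes, slopes)).1)
        (((PySem.List.enumerate cs k).foldl scanStepA (lakes, slopes)).2)
        (k + cs.length) := by
  induction cs with
  | nil => intro k lakes slopes _ hinv; simpa [PySem.List.enumerate] using hinv
  | cons c cs' ih =>
    intro k lakes slopes hk hinv
    obtain ⟨⟨hwb, hwp⟩, hsp, hsb, hsl, hlk⟩ := hinv
    rw [PySem.List.enumerate_cons]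
    simp only [List.foldl_cons]
    have hlen : k + ((c :: cs').length : Int) = (k + 1) + (cs'.length : Int) := by
      simp; ring
    rw [hlen]
    by_cases hb : c = '\\'
    · have hA : scanStepA (lakes, slopes) (k, c) = (lakes, k :: slopes) := by
        simp [scanStepA, hb]
      rw [hA]
      refine ih (k + 1) lakes (k :: slopes) (by omega) ?_
      refine ⟨⟨hwb, hwp⟩, ?_, ?_, ?_, ?_⟩
      · exact List.pairwise_cons.2 ⟨fun j hj => (hsb j hj).2, hsp⟩
      · intro j hj
        rcases List.mem_cons.1 hj with rfl | hj'
        · omega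
        · have := hsb j hj'; omega
      · intro j hj p hp
        rcases List.mem_cons.1 hj with rfl | hj'
        · exact Or.inr (hlk p hp)
        · exact hsl j hj' p hp
      · intro p hp; have := hlk p hp; omega
    · by_cases hf : c = '/'
      · cases slopes with
        | nil =>
          have hA : scanStepA (lakes, []) (k, c) = (lakes, []) := by
            simp [scanStepA, hf]
          rw [hA]
          refine ih (k + 1) lakes [] (by omega) ?_
          refine ⟨⟨hwb, hwp⟩, by simp, by simp, by simp, ?_⟩
          intro p hp; have := hlk p hp; omega
        | cons j rest =>
          have hA : scanStepA (lakes, j :: rest) (k, c) = (lakes ++ [(j, k)], rest) := by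
            simp [scanStepA, hf]
          rw [hA]
          have hj := hsb j (by simp)
          refine ih (k + 1) (lakes ++ [(j, k)]) rest (by omega) ?_
          refine ⟨⟨?_, ?_⟩, ?_, ?_, ?_, ?_⟩
          · intro p hp
            rcases List.mem_append.1 hp with hp' | hp'
            · exact hwb p hp'
            · simp at hp'; subst hp'; exact ⟨hj.1, hj.2⟩
          · refine List.pairwise_append.2 ⟨hwp, by simp, ?_⟩
            intro p hp q hq
            simp at hq; subst hq
            exact ⟨hlk p hp, hsl j (by simp) p hp⟩
          · exact (List.pairwise_cons.1 hsp).2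
          · intro j' hj'; have := hsb j' (List.mem_cons_of_mem _ hj'); omega
          · intro j' hj' p hp
            rcases List.mem_append.1 hp with hp' | hp'
            · exact hsl j' (List.mem_cons_of_mem _ hj') p hp'
            · simp at hp'; subst hp'
              have := (List.pairwise_cons.1 hsp).1 j' hj'
              omega
          · intro p hp
            rcases List.mem_append.1 hp with hp' | hp'
            · have := hlk p hp'; omega
            · simp at hp'; subst hp'; simp
      · have hA : scanStepA (lakes, slopes) (k, c) = (lakes, slopes) := by
          simp [scanStepA, hb, hf]
        rw [hA]
        refine ih (k + 1) lakes slopes (by omega) ?_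
        refine ⟨⟨hwb, hwp⟩, hsp, ?_, hsl, ?_⟩
        · intro j hj; have := hsb j hj; omega
        · intro p hp; have := hlk p hp; omega

-- decomposition of a well-nested pair list around the outermost last pair (j, i)
theorem split_lemma (j i : Int) : ∀ ls : List (Int × Int), ls.Pairwise Nested →
    (∀ p ∈ ls, 0 ≤ p.1 ∧ p.1 < p.2) → (∀ p ∈ ls, p.2 < i ∧ (j < p.1 ∨ p.2 < j)) →
    ∃ A B, ls = A ++ B ∧ (∀ p ∈ A, p.2 < j ∧ p.1 < p.2 ∧ 0 ≤ p.1)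
      ∧ (∀ p ∈ B, j < p.1 ∧ p.2 < i ∧ p.1 < p.2) := by
  intro ls
  induction ls with
  | nil => intro _ _ _; exact ⟨[], [], rfl, by simp, by simp⟩
  | cons p ls' ih =>
    intro hpw hb h3
    have hpls' : ∀ q ∈ ls', Nested p q := (List.pairwise_cons.1 hpw).1
    have hpw' := (List.pairwise_cons.1 hpw).2
    have hb' : ∀ q ∈ ls', 0 ≤ q.1 ∧ q.1 < q.2 := fun q hq => hb q (List.mem_cons_of_mem _ hq)
    have h3' : ∀ q ∈ ls', q.2 < i ∧ (j < q.1 ∨ q.2 < j) := fun q hq => h3 q (List.mem_cons_of_mem _ hq)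
    have hbp := hb p (by simp)
    rcases (h3 p (by simp)).2 with hjp | hpj
    · refine ⟨[], p :: ls', by simp, by simp, ?_⟩
      intro q hq
      rcases List.mem_cons.1 hq with rfl | hq'
      · exact ⟨hjp, (h3 q (by simp)).1, hbp.2⟩
      · have hn := hpls' q hq'
        have hq3 := h3' q hq'
        have hqb := hb' q hq'
        refine ⟨?_, hq3.1, hqb.2⟩
        rcases hq3.2 with h | h
        · exact h
        · exfalso; have := hn.1; omega
    · obtain ⟨A', B', heq, hA', hB'⟩ := ih hpw' hb' h3'
      exact ⟨p :: A', B', by simp [heq], by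
        intro q hq
        rcases List.mem_cons.1 hq with rfl | hq'
        · exact ⟨hpj, hbp.2, hbp.1⟩
        · exact hA' q hq', hB'⟩

def SB (B : List (Int × Int)) : Int := (B.map (fun p => p.2 - p.1)).sum

-- calc side
theorem calc_merge_all (j i : Int) : ∀ (B : List (Int × Int)) (a : Int) (rest : List Int),
    (∀ p ∈ B, j < p.1 ∧ p.2 < i) →
    B.reverse.foldl calcStep (a :: rest, j, i) = ((a + SB B) :: rest, j, i) := by
  intro B
  induction B using List.reverseRecOn with
  | nil => intro a rest _; simp [SB]
  | append_singleton B' q ih =>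
    intro a rest h
    have hq := h q (by simp)
    have hcond : j < q.1 ∧ i > q.2 := ⟨hq.1, hq.2⟩
    simp only [List.reverse_append, List.reverse_singleton, List.singleton_append, List.foldl_cons]
    have hstep : calcStep (a :: rest, j, i) q = ((a + (q.2 - q.1)) :: rest, j, i) := by
      simp [calcStep, hcond]
    rw [hstep, ih (a + (q.2 - q.1)) rest (fun p hp => h p (by simp [hp]))]
    have : SB (B' ++ [q]) = SB B' + (q.2 - q.1) := by simp [SB]
    rw [this]; ring_nf

theorem calc_tail_frozen : ∀ (rls : List (Int × Int)) (a : Int) (areas tail : List Int) (e1 e2 : Int),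
    rls.foldl calcStep ((a :: areas) ++ tail, e1, e2)
      = ((rls.foldl calcStep (a :: areas, e1, e2)).1 ++ tail,
         (rls.foldl calcStep (a :: areas, e1, e2)).2) := by
  intro rls
  induction rls with
  | nil => intro a areas tail e1 e2; simp
  | cons p rls' ih =>
    intro a areas tail e1 e2
    simp only [List.foldl_cons]
    by_cases hc : e1 < p.1 ∧ e2 > p.2
    · have h1 : calcStep ((a :: areas) ++ tail, e1, e2) p
          = ((a + (p.2 - p.1)) :: areas ++ tail, e1, e2) := by simp [calcStep, hc]
      have h2 : calcStep (a :: areas, e1, e2) p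
          = ((a + (p.2 - p.1)) :: areas, e1, e2) := by simp [calcStep, hc]
      rw [h1, h2]
      exact ih (a + (p.2 - p.1)) areas tail e1 e2
    · have h1 : calcStep ((a :: areas) ++ tail, e1, e2) p
          = ((p.2 - p.1) :: (a :: areas) ++ tail, p.1, p.2) := by simp [calcStep, hc]
      have h2 : calcStep (a :: areas, e1, e2) p
          = ((p.2 - p.1) :: a :: areas, p.1, p.2) := by simp [calcStep, hc]
      rw [h1, h2]
      exact ih (p.2 - p.1) (a :: areas) tail p.1 p.2

theorem calc_decomp (j i : Int) (A B : List (Int × Int)) (hji : j < i)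
    (hA : ∀ p ∈ A, p.2 < j ∧ p.1 < p.2 ∧ 0 ≤ p.1) (hB : ∀ p ∈ B, j < p.1 ∧ p.2 < i) :
    calcAreas (A ++ B ++ [(j, i)]) = calcAreas A ++ [(i - j) + SB B] := by
  unfold calcAreas
  have hrev : (A ++ B ++ [(j, i)]).reverse = (j, i) :: (B.reverse ++ A.reverse) := by simp
  rw [hrev]
  simp only [List.foldl_cons]
  have h1 : calcStep ([], 0, 0) (j, i) = ([i - j], j, i) := by
    simp [calcStep]; omega
  rw [h1, List.foldl_append]
  rw [calc_merge_all j i B (i - j) [] (fun p hp => ⟨(hB p hp).1, (hB p hp).2⟩)]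
  cases A using List.reverseRecOn with
  | nil => simp
  | append_singleton A' q =>
    have hq := hA q (by simp)
    have hrevA : (A' ++ [q]).reverse = q :: A'.reverse := by simp
    rw [hrevA]
    simp only [List.foldl_cons]
    have hc1 : ¬ (j < q.1 ∧ i > q.2) := by
      intro h; have := hq.1; have := hq.2.1; omega
    have h2 : calcStep ([i - j + SB B], j, i) q
        = ((q.2 - q.1) :: [] ++ [i - j + SB B], q.1, q.2) := by simp [calcStep, hc1]
    have hc2 : ¬ ((0 : Int) < q.1 ∧ (0 : Int) > q.2) := by
      intro h; have := hq.2.1; have := hq.2.2; omega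
    have h3 : calcStep ([], 0, 0) q = ([q.2 - q.1], q.1, q.2) := by simp [calcStep, hc2]
    rw [h2, h3, calc_tail_frozen A'.reverse (q.2 - q.1) [] [i - j + SB B] q.1 q.2]

-- pond side
theorem pondPush_mem : ∀ (P : List (Int × Int)) (j a : Int) (x : Int × Int),
    x ∈ pondPush P j a → x.1 = j ∨ x ∈ P := by
  intro P
  induction P with
  | nil =>
    intro j a x hx
    simp [pondPush] at hx
    left; simp [hx]
  | cons hd tl ih =>
    obtain ⟨l, b⟩ := hd
    intro j a x hx
    simp only [pondPush] at hx
    split at hx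
    · rcases ih j (a + b) x hx with h | h
      · exact Or.inl h
      · exact Or.inr (List.mem_cons_of_mem _ h)
    · rcases List.mem_cons.1 hx with h | h
      · left; simp [h]
      · exact Or.inr h

theorem pondPush_split : ∀ (S P : List (Int × Int)) (j a : Int), (∀ x ∈ P, x.1 < j) →
    pondPush (S ++ P) j a = pondPush S j a ++ P := by
  intro S
  induction S with
  | nil =>
    intro P j a hP
    cases P with
    | nil => simp [pondPush]
    | cons x P' =>
      obtain ⟨l, b⟩ := x
      have : ¬ l > j := by have := hP (l, b) (by simp); simp at this ⊢; omega
      simp [pondPush, this]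
  | cons hd tl ih =>
    obtain ⟨l, b⟩ := hd
    intro P j a hP
    by_cases h : l > j
    · simp [pondPush, h, ih P j (a + b) hP]
    · simp [pondPush, h]

theorem pondPush_pop_all : ∀ (S P : List (Int × Int)) (j a : Int),
    (∀ x ∈ S, j < x.1) → (∀ x ∈ P, x.1 < j) →
    pondPush (S ++ P) j a = (j, a + (S.map Prod.snd).sum) :: P := by
  intro S
  induction S with
  | nil =>
    intro P j a hS hP
    cases P with
    | nil => simp [pondPush]
    | cons x P' =>
      obtain ⟨l, b⟩ := x
      have : ¬ l > j := by have := hP (l, b) (by simp); simp at this ⊢; omega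
      simp [pondPush, this]
  | cons hd tl ih =>
    obtain ⟨l, b⟩ := hd
    intro P j a hS hP
    have hl : l > j := hS (l, b) (by simp)
    simp only [List.cons_append, pondPush, if_pos hl]
    rw [ih P j (a + b) (fun x hx => hS x (List.mem_cons_of_mem _ hx)) hP]
    simp; ring

theorem foldG_split : ∀ (B S P : List (Int × Int)), (∀ x ∈ P, ∀ p ∈ B, x.1 < p.1) →
    B.foldl gstep (S ++ P) = B.foldl gstep S ++ P := by
  intro B
  induction B with
  | nil => intro S P h; simp
  | cons q B' ih =>
    intro S P h
    simp only [List.foldl_cons]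
    have h1 : gstep (S ++ P) q = gstep S q ++ P := by
      unfold gstep
      exact pondPush_split S P q.1 (q.2 - q.1) (fun x hx => h x hx q (by simp))
    rw [h1]
    exact ih (gstep S q) P (fun x hx p hp => h x hx p (List.mem_cons_of_mem _ hp))

theorem pondPush_sum : ∀ (P : List (Int × Int)) (j a : Int),
    ((pondPush P j a).map Prod.snd).sum = a + (P.map Prod.snd).sum := by
  intro P
  induction P with
  | nil => intro j a; simp [pondPush]
  | cons hd tl ih =>
    obtain ⟨l, b⟩ := hd
    intro j a
    by_cases h : l > j
    · simp [pondPush, h, ih j (a + b)]; ring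
    · simp [pondPush, h]

theorem foldG_sum : ∀ (B S : List (Int × Int)),
    ((B.foldl gstep S).map Prod.snd).sum = SB B + (S.map Prod.snd).sum := by
  intro B
  induction B with
  | nil => intro S; simp [SB]
  | cons q B' ih =>
    intro S
    simp only [List.foldl_cons]
    rw [ih (gstep S q)]
    unfold gstep
    rw [pondPush_sum]
    simp [SB]; ring

theorem foldG_lefts : ∀ (B S : List (Int × Int)) (x : Int × Int),
    x ∈ B.foldl gstep S → (∃ p ∈ B, x.1 = p.1) ∨ x ∈ S := by
  intro B
  induction B with
  | nil => intro S x hx; exact Or.inr hx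
  | cons q B' ih =>
    intro S x hx
    rcases ih (gstep S q) x hx with h | h
    · rcases h with ⟨p, hp, he⟩
      exact Or.inl ⟨p, List.mem_cons_of_mem _ hp, he⟩
    · rcases pondPush_mem S q.1 (q.2 - q.1) x h with h2 | h2
      · exact Or.inl ⟨q, by simp, h2⟩
      · exact Or.inr h2

theorem G_mem : ∀ (ls : List (Int × Int)) (x : Int × Int), x ∈ G ls → ∃ p ∈ ls, x.1 = p.1 := by
  intro ls x hx
  rcases foldG_lefts ls [] x hx with h | h
  · exact h
  · simp at h

theorem G_decomp (j i : Int) (A B : List (Int × Int))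
    (hA : ∀ p ∈ A, p.1 < j) (hB : ∀ p ∈ B, j < p.1) :
    G (A ++ B ++ [(j, i)]) = (j, (i - j) + SB B) :: G A := by
  have hGA : ∀ x ∈ G A, x.1 < j := by
    intro x hx
    rcases G_mem A x hx with ⟨p, hp, he⟩
    rw [he]; exact hA p hp
  have h1 : G (A ++ B ++ [(j, i)]) = pondPush (G (A ++ B)) j (i - j) := by
    simp [G, List.foldl_append, gstep]
  have h2 : G (A ++ B) = B.foldl gstep [] ++ G A := by
    have : G (A ++ B) = B.foldl gstep ([] ++ G A) := by
      simp [G, List.foldl_append]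
    rw [this]
    exact foldG_split B [] (G A) (fun x hx p hp => lt_trans (hGA x hx) (hB p hp))
  have hBf : ∀ x ∈ B.foldl gstep [], j < x.1 := by
    intro x hx
    rcases foldG_lefts B [] x hx with ⟨p, hp, he⟩ | h
    · rw [he]; exact hB p hp
    · simp at h
  rw [h1, h2, pondPush_pop_all _ _ _ _ hBf hGA]
  have : ((B.foldl gstep []).map Prod.snd).sum = SB B := by
    have := foldG_sum B []
    simpa using this
  rw [this]

-- main: on well-nested pair lists A's merge pass equals B's pond stack
theorem main_calc : ∀ (n : Nat) (ls : List (Int × Int)), ls.length ≤ n → WF ls →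
    calcAreas ls = ((G ls).map Prod.snd).reverse := by
  intro n
  induction n with
  | zero =>
    intro ls hlen _
    have : ls = [] := List.eq_nil_of_length_eq_zero (Nat.le_zero.1 hlen)
    subst this; simp [calcAreas, G]
  | succ n ih =>
    intro ls hlen hwf
    cases ls using List.reverseRecOn with
    | nil => simp [calcAreas, G]
    | append_singleton ls' q =>
      obtain ⟨j, i⟩ := q
      obtain ⟨hb, hpw⟩ := hwf
      obtain ⟨hpw', _, hcross⟩ := List.pairwise_append.1 hpw
      have hji := hb (j, i) (by simp)
      have h3 : ∀ p ∈ ls', p.2 < i ∧ (j < p.1 ∨ p.2 < j) := by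
        intro p hp
        have := hcross p hp (j, i) (by simp)
        exact ⟨this.1, this.2⟩
      have hb' : ∀ p ∈ ls', 0 ≤ p.1 ∧ p.1 < p.2 :=
        fun p hp => hb p (List.mem_append_left _ hp)
      obtain ⟨A, B, heq, hA, hB⟩ := split_lemma j i ls' hpw' hb' h3
      subst heq
      have hAlt : ∀ p ∈ A, p.1 < j := by
        intro p hp; have := hA p hp; omega
      have hwfA : WF A := by
        refine ⟨fun p hp => hb' p (List.mem_append_left _ hp), ?_⟩
        exact (List.pairwise_append.1 hpw').1
      have hlenA : A.length ≤ n := by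
        simp [List.length_append] at hlen; omega
      have hIH := ih A hlenA hwfA
      rw [calc_decomp j i A B hji.2 hA (fun p hp => ⟨(hB p hp).1, (hB p hp).2.1⟩)]
      rw [G_decomp j i A B hAlt (fun p hp => (hB p hp).1)]
      simp [hIH]

-- ===== VERDICT (by name: the statement is the Claim_ definition above) =====
theorem find_lakes_spec : Claim_equal_find_lakes := by
  intro diagram _
  unfold Spec_find_lakes find_lakes find_lakes_alt
  have h0 : ScanInv [] [] 0 := by
    refine ⟨⟨by simp, by simp⟩, by simp, by simp, by simp, by simp⟩
  have hinv := scan_inv diagram.toList 0 [] [] (by omega) h0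
  have hrel := scan_rel diagram.toList 0 [] []
  have hG : G ([] : List (Int × Int)) = [] := by simp [G]
  rw [hG] at hrel
  rw [hrel]
  exact main_calc _ _ le_rfl hinv.1
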